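-- pv_equiv track=rewrite | github.com/Wildfire0007/market-feed | scripts/download_entry_gate_stats.py | find_artifact
-- ===== SOURCE A (Python) =====
-- from typing import Dict, Iterable, List, Optional
--
-- def find_artifact(artifacts: List[dict], name: str) -> Optional[dict]:
--     def _normalize(value: str) -> str:
--         return value.lower().replace("_", "-").replace(" ", "-")
--
--     target = _normalize(name)
--
--     # Exact normalized match
--     for artifact in artifacts:
--         if _normalize(artifact.get("name", "")) == target:
--             return artifact
--
--     # Fallback: substring match to catch suffixes (e.g., entry-gate-stats-public)
--     for artifact in artifacts:
--         if target in _normalize(artifact.get("name", "")):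
--             return artifact
--
--     return None
-- ===== SOURCE B (Python) =====
-- def find_artifact(artifacts, name):
--     def _normalize(value: str) -> str:
--         return value.lower().replace("_", "-").replace(" ", "-")
--
--     target = _normalize(name)
--     first_substring = None
--     for artifact in artifacts:
--         norm = _normalize(artifact.get("name", ""))
--         if norm == target:
--             return artifact
--         if first_substring is None and target in norm:
--             first_substring = artifact
--     return first_substring
-- ===== Notes on version B (the rewrite author's own statement) =====
-- stated objective: simpler
-- what changed: Replaces A's two full scans (exact pass, then substring pass) by one single pass that returns immediately on an exact match and keeps the first substring match in an accumulator.
import Mathlib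
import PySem

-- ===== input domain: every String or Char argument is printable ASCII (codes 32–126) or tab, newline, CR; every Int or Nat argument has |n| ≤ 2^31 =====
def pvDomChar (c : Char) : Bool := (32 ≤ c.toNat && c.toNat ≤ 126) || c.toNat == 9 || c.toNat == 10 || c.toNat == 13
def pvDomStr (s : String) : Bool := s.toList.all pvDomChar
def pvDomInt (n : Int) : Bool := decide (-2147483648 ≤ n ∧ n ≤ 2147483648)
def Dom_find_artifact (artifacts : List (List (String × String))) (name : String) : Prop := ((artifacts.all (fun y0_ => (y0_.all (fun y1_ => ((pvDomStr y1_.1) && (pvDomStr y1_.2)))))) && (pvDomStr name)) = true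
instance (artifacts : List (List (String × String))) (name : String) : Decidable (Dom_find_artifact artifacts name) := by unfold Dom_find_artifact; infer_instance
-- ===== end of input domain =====

-- B replaces A's two full scans (exact pass then substring pass) by one single
-- pass keeping the first substring match in an accumulator; objective: simpler.

-- ===== PORT A =====
-- _normalize(value) = value.lower().replace("_", "-").replace(" ", "-")
def pvNormalize (value : String) : String :=
  PySem.Str.replace (PySem.Str.replace (PySem.Str.lower value) "_" "-") " " "-"

-- artifact.get("name", "")
def pvGetName (artifact : List (String × String)) : String :=
  PySem.Dict.getD (PySem.Dict.mk artifact) "name" ""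

-- first loop: exact normalized match (first hit returned)
def pvExactScan (target : String) : List (List (String × String)) → Option (List (String × String))
  | [] => none
  | a :: rest =>
      if pvNormalize (pvGetName a) == target then some a else pvExactScan target rest

-- second loop: substring match (first hit returned)
def pvSubScan (target : String) : List (List (String × String)) → Option (List (String × String))
  | [] => none
  | a :: rest =>
      if PySem.Str.isIn target (pvNormalize (pvGetName a)) then some a else pvSubScan target rest

def find_artifact (artifacts : List (List (String × String))) (name : String) : Option (List (String × String)) :=
  let target := pvNormalize name
  match pvExactScan target artifacts with
  | some a => some a
  | none => pvSubScan target artifacts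

-- ===== PORT B =====
-- single pass with accumulator `first_substring`
def pvLoopB (target : String) : List (List (String × String)) → Option (List (String × String)) → Option (List (String × String))
  | [], acc => acc
  | a :: rest, acc =>
      let norm := pvNormalize (pvGetName a)
      if norm == target then some a
      else if acc.isNone && PySem.Str.isIn target norm then pvLoopB target rest (some a)
      else pvLoopB target rest acc

def find_artifact_alt (artifacts : List (List (String × String))) (name : String) : Option (List (String × String)) :=
  pvLoopB (pvNormalize name) artifacts none

-- ===== PRECONDITION & SPEC =====
def Spec_find_artifact (artifacts : List (List (String × String))) (name : String) (out : Option (List (String × String))) : Prop := out = find_artifact_alt artifacts name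
instance (artifacts : List (List (String × String))) (name : String) (out : Option (List (String × String))) : Decidable (Spec_find_artifact artifacts name out) := by unfold Spec_find_artifact; infer_instance

-- ===== CLAIM (what is proved, stated in full; the proofs are below) =====
def Claim_equal_find_artifact : Prop := ∀ (artifacts : List (List (String × String))) (name : String), Dom_find_artifact artifacts name → Spec_find_artifact artifacts name (find_artifact artifacts name)

-- ===== LEMMAS AND PROOFS =====

-- B's loop computes: first exact match, else (accumulator, else first substring match)
theorem pvLoopB_eq (target : String) (l : List (List (String × String)))
    (acc : Option (List (String × String))) :
    pvLoopB target l acc =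
      match pvExactScan target l with
      | some a => some a
      | none => match acc with
                | some x => some x
                | none => pvSubScan target l := by
  induction l generalizing acc with
  | nil => cases acc <;> rfl
  | cons a rest ih =>
    simp only [pvLoopB, pvExactScan, pvSubScan]
    by_cases he : (pvNormalize (pvGetName a) == target) = true
    · simp [he]
    · rw [if_neg he]
      cases acc with
      | some x =>
        simp only [Option.isNone_some, Bool.false_and]
        rw [if_neg (by simp), ih]
        simp [he]
      | none =>
        simp only [Option.isNone_none, Bool.true_and]
        by_cases hs : PySem.Str.isIn target (pvNormalize (pvGetName a)) = true
        · rw [if_pos hs, ih]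
          simp only [PySem.Str.isIn_eq] at hs
          simp [he, hs]
        · rw [if_neg hs, ih]
          simp only [PySem.Str.isIn_eq] at hs
          simp [he, hs]

-- ===== VERDICT (by name: the statement is the Claim_ definition above) =====
theorem find_artifact_spec : Claim_equal_find_artifact := by
  intro artifacts name _
  unfold Spec_find_artifact find_artifact find_artifact_alt
  rw [pvLoopB_eq]
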